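-- pv_equiv track=rewrite | github.com/LaiXuanHieu/C-u-Tr-c-D-Li-u | Chuong5/5.4.py | generate_valid_expressions
-- ===== SOURCE A (Python) =====
-- from itertools import combinations
--
-- def generate_valid_expressions(expression, pairs):
--     results = set()
--     n = len(pairs)
--
--     for r in range(1, n + 1):
--         for combination in combinations(pairs, r):
--             indexes_to_remove = set()
--             for pair in combination:
--                 indexes_to_remove.update(pair)
--
--             new_expr = ''.join(
--                 expression[i] for i in range(len(expression)) if i not in indexes_to_remove
--             )
--             results.add(new_expr)
--
--     return sorted(results)
-- ===== SOURCE B (Python) =====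
-- def generate_valid_expressions(expression, pairs):
--     # DP over the pairs: union_sets = all distinct unions of nonempty subsets
--     # of the pairs processed so far, kept as frozensets.
--     union_sets = set()
--     for a, b in pairs:
--         p = frozenset((a, b))
--         union_sets = union_sets | {s | p for s in union_sets} | {p}
--     out = set()
--     for rem in union_sets:
--         out.add(''.join(ch for i, ch in enumerate(expression) if i not in rem))
--     return sorted(out)
-- ===== Notes on version B (the rewrite author's own statement) =====
-- stated objective: faster
-- what changed: B replaces A's enumeration of all 2^n-1 pair combinations (one removal pass per subset) by a single left-to-right pass that maintains the set of DISTINCT removal-index frozensets (unions of nonempty subsets of the processed prefix) and renders the surviving string once per distinct removal set.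
import Mathlib
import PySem

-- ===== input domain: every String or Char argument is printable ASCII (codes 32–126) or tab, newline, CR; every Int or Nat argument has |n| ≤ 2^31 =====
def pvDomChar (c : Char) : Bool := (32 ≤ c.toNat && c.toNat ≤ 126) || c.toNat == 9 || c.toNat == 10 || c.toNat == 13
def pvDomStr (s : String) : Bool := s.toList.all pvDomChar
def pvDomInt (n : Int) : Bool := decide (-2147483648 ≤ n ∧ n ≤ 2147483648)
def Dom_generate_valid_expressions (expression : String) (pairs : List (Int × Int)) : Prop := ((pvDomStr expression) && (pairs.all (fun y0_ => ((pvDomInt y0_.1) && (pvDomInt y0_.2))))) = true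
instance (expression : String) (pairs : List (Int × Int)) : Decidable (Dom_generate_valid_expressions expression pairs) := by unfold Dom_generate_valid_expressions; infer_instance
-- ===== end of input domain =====

-- B replaces A's per-size combinations enumeration by a left-to-right pass over the pairs that
-- maintains the set of distinct removal-index sets (unions of nonempty subsets of the processed
-- prefix) and renders each distinct removal set once (objective: faster, measured).


-- ===== PORT A =====

-- ''.join(expression[i] for i in range(len(expression)) if i not in indexes_to_remove)
def gveKeep (expression : String) (idxs : PySem.Set Int) : String :=
  String.ofList ((List.range expression.toList.length).filterMap
    (fun i : Nat => if PySem.Set.contains idxs (i : Int) then none else PySem.Str.pyGet? expression (i : Int)))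

def generate_valid_expressions (expression : String) (pairs : List (Int × Int)) : List String :=
  let n := pairs.length
  let results : PySem.Set String :=
    (PySem.List.pyRange 1 ((n : Int) + 1) 1).foldl (fun results r =>
      (PySem.List.combinations pairs r.toNat).foldl (fun results combination =>
        let idxs : PySem.Set Int :=
          combination.foldl (fun s pair => PySem.Set.update s [pair.1, pair.2]) PySem.Set.empty
        PySem.Set.add results (gveKeep expression idxs)) results) PySem.Set.empty
  PySem.List.sorted results (fun x => x) false

-- ===== PORT B =====

-- ''.join(ch for i, ch in enumerate(expression) if i not in rem); rem is a frozenset of ints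
def gveKeepF (expression : String) (rem : Finset Int) : String :=
  String.ofList ((PySem.List.enumerate expression.toList 0).filterMap
    (fun p => if p.1 ∈ rem then none else some p.2))

def generate_valid_expressions_alt (expression : String) (pairs : List (Int × Int)) : List String :=
  let union_sets : Finset (Finset Int) := pairs.foldl
    (fun us p => us ∪ us.image (· ∪ {p.1, p.2}) ∪ {({p.1, p.2} : Finset Int)}) ∅
  let out : Finset String := union_sets.image (fun rem => gveKeepF expression rem)
  out.sort (· ≤ ·)

-- ===== PRECONDITION & SPEC =====
def Spec_generate_valid_expressions (expression : String) (pairs : List (Int × Int)) (out : List String) : Prop := out = generate_valid_expressions_alt expression pairs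
instance (expression : String) (pairs : List (Int × Int)) (out : List String) : Decidable (Spec_generate_valid_expressions expression pairs out) := by unfold Spec_generate_valid_expressions; infer_instance

-- ===== CLAIM (what is proved, stated in full; the proofs are below) =====
def Claim_equal_generate_valid_expressions : Prop := ∀ (expression : String) (pairs : List (Int × Int)), Dom_generate_valid_expressions expression pairs → Spec_generate_valid_expressions expression pairs (generate_valid_expressions expression pairs)

-- ===== LEMMAS AND PROOFS =====

-- the union of the index sets of a combination, as a Finset
def gveUnion (c : List (Int × Int)) : Finset Int :=
  c.foldr (fun p acc => ({p.1, p.2} : Finset Int) ∪ acc) ∅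

theorem mem_gveUnion (c : List (Int × Int)) (i : Int) :
    i ∈ gveUnion c ↔ ∃ p ∈ c, i = p.1 ∨ i = p.2 := by
  induction c with
  | nil => simp [gveUnion]
  | cons p c ih =>
    simp only [gveUnion, List.foldr_cons] at ih ⊢
    simp only [Finset.mem_union, ih, List.mem_cons]
    simp

theorem gveUnion_cons (p : Int × Int) (c : List (Int × Int)) :
    gveUnion (p :: c) = ({p.1, p.2} : Finset Int) ∪ gveUnion c := rfl

-- membership in A's indexes_to_remove loop
theorem mem_idxs (c : List (Int × Int)) (s : PySem.Set Int) (i : Int) :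
    i ∈ c.foldl (fun s pair => PySem.Set.update s [pair.1, pair.2]) s ↔
      i ∈ s ∨ ∃ p ∈ c, i = p.1 ∨ i = p.2 := by
  induction c generalizing s with
  | nil => simp
  | cons p c ih =>
    rw [List.foldl_cons, ih, PySem.Set.mem_update]
    simp only [List.mem_cons, List.not_mem_nil, or_false]
    constructor
    · rintro ((h | h) | ⟨q, hq, hiq⟩)
      · exact Or.inl h
      · exact Or.inr ⟨p, Or.inl rfl, h⟩
      · exact Or.inr ⟨q, Or.inr hq, hiq⟩
    · rintro (h | ⟨q, (rfl | hq), hiq⟩)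
      · exact Or.inl (Or.inl h)
      · exact Or.inl (Or.inr hiq)
      · exact Or.inr ⟨q, hq, hiq⟩

-- the two join-comprehensions agree when the membership tests agree
theorem filterMap_enum_eq (cs : List Char) (P : Int → Prop) [DecidablePred P] :
    ∀ s : Int, (PySem.List.enumerate cs s).filterMap (fun p => if P p.1 then none else some p.2)
      = (List.range cs.length).filterMap
          (fun i : Nat => if P (s + (i : Int)) then none else cs[i]?) := by
  induction cs with
  | nil => intro s; simp
  | cons c cs ih =>
    intro s
    rw [PySem.List.enumerate_cons, List.filterMap_cons]
    have hr : List.range (c :: cs).length = 0 :: (List.range cs.length).map (· + 1) := by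
      simp [List.range_succ_eq_map]
    rw [hr, List.filterMap_cons, List.filterMap_map]
    have h1 : ((fun i : Nat => if P (s + (i : Int)) then none else (c :: cs)[i]?) ∘ (· + 1))
        = (fun i : Nat => if P ((s + 1) + (i : Int)) then none else cs[i]?) := by
      funext i
      have hcast : s + ((i : Int) + 1) = (s + 1) + (i : Int) := by ring
      simp [Function.comp, hcast]
    rw [h1, ← ih (s + 1)]
    by_cases hp : P s <;> simp [hp]

theorem keep_eq (expression : String) (idxs : PySem.Set Int) (rem : Finset Int)
    (h : ∀ i : Int, i ∈ idxs ↔ i ∈ rem) :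
    gveKeep expression idxs = gveKeepF expression rem := by
  unfold gveKeep gveKeepF
  congr 1
  rw [filterMap_enum_eq expression.toList (fun i => i ∈ rem) 0]
  apply List.filterMap_congr
  intro i _
  have hc : PySem.Set.contains idxs (i : Int) = decide ((i : Int) ∈ rem) := by
    by_cases hm : (i : Int) ∈ rem
    · simp [hm, (h i).mpr hm]
    · simp only [hm, decide_false]
      by_contra hcon
      simp only [Bool.not_eq_false, PySem.Set.contains_iff] at hcon
      exact hm ((h i).mp hcon)
  rw [hc]
  by_cases hm : (i : Int) ∈ rem <;> simp [hm]

-- membership in A's nested result-building folds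
theorem mem_outer_fold (rs : List Int) (g : Int → List (List (Int × Int)))
    (f : List (Int × Int) → String) (acc : PySem.Set String) (x : String) :
    x ∈ rs.foldl (fun res r => (g r).foldl (fun res c => PySem.Set.add res (f c)) res) acc ↔
      x ∈ acc ∨ ∃ r ∈ rs, ∃ c ∈ g r, x = f c := by
  induction rs generalizing acc with
  | nil => simp
  | cons r rs ih =>
    rw [List.foldl_cons, ih, PySem.Set.mem_foldl_add]
    constructor
    · rintro (( h | ⟨c, hc, hx⟩) | ⟨r', hr', c, hc, hx⟩)
      · exact Or.inl h
      · exact Or.inr ⟨r, by simp, c, hc, hx⟩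
      · exact Or.inr ⟨r', by simp [hr'], c, hc, hx⟩
    · rintro (h | ⟨r', hr', c, hc, hx⟩)
      · exact Or.inl (Or.inl h)
      · rcases List.mem_cons.mp hr' with h | h
        · exact Or.inl (Or.inr ⟨c, by simp [← h, hc], hx⟩)
        · exact Or.inr ⟨r', h, c, hc, hx⟩

-- Nodup of A's nested result-building folds
theorem nodup_inner_fold (l : List (List (Int × Int))) (f : List (Int × Int) → String)
    (acc : PySem.Set String) (h : acc.Nodup) :
    (l.foldl (fun res c => PySem.Set.add res (f c)) acc).Nodup := by
  induction l generalizing acc with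
  | nil => exact h
  | cons c l ih => exact ih _ (PySem.Set.nodup_add _ _ h)

theorem nodup_outer_fold (rs : List Int) (g : Int → List (List (Int × Int)))
    (f : List (Int × Int) → String) (acc : PySem.Set String) (h : acc.Nodup) :
    (rs.foldl (fun res r => (g r).foldl (fun res c => PySem.Set.add res (f c)) res) acc).Nodup := by
  induction rs generalizing acc with
  | nil => exact h
  | cons r rs ih => exact ih _ (nodup_inner_fold _ _ _ h)

-- invariant of B's left-to-right pass
theorem mem_B_fold (l : List (Int × Int)) :
    ∀ (us : Finset (Finset Int)) (rem : Finset Int),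
    rem ∈ l.foldl (fun us p => us ∪ us.image (· ∪ {p.1, p.2}) ∪ {({p.1, p.2} : Finset Int)}) us ↔
      rem ∈ us ∨ (∃ c, c.Sublist l ∧ c ≠ [] ∧ rem = gveUnion c) ∨
        (∃ s ∈ us, ∃ c, c.Sublist l ∧ c ≠ [] ∧ rem = s ∪ gveUnion c) := by
  induction l with
  | nil => simp
  | cons p l ih =>
    intro us rem
    rw [List.foldl_cons, ih]
    constructor
    · rintro (h | ⟨c, hsub, hne, hrem⟩ | ⟨s, hs, c, hsub, hne, hrem⟩)
      · -- rem ∈ us'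
        simp only [Finset.mem_union, Finset.mem_image, Finset.mem_singleton] at h
        rcases h with (h | ⟨s, hs, hrem⟩) | h
        · exact Or.inl h
        · refine Or.inr (Or.inr ⟨s, hs, [p], by simp, by simp, ?_⟩)
          simp [← hrem, gveUnion]
        · refine Or.inr (Or.inl ⟨[p], by simp, by simp, ?_⟩)
          simp [h, gveUnion]
      · exact Or.inr (Or.inl ⟨c, hsub.cons p, hne, hrem⟩)
      · simp only [Finset.mem_union, Finset.mem_image, Finset.mem_singleton] at hs
        rcases hs with (hs | ⟨t, ht, hst⟩) | hs
        · exact Or.inr (Or.inr ⟨s, hs, c, hsub.cons p, hne, hrem⟩)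
        · refine Or.inr (Or.inr ⟨t, ht, p :: c, hsub.cons₂ p, by simp, ?_⟩)
          rw [hrem, ← hst, gveUnion_cons, Finset.union_assoc]
        · refine Or.inr (Or.inl ⟨p :: c, hsub.cons₂ p, by simp, ?_⟩)
          rw [hrem, hs, gveUnion_cons]
    · rintro (h | ⟨c, hsub, hne, hrem⟩ | ⟨s, hs, c, hsub, hne, hrem⟩)
      · exact Or.inl (by simp [h])
      · rcases List.sublist_cons_iff.mp hsub with h | ⟨r, hcr, hr⟩
        · exact Or.inr (Or.inl ⟨c, h, hne, hrem⟩)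
        · rcases r with _ | ⟨q, r⟩
          · subst hcr
            refine Or.inl ?_
            simp [hrem, gveUnion]
          · refine Or.inr (Or.inr ⟨{p.1, p.2}, by simp, q :: r, hr, by simp, ?_⟩)
            rw [hrem, hcr, gveUnion_cons]
      · rcases List.sublist_cons_iff.mp hsub with h | ⟨r, hcr, hr⟩
        · exact Or.inr (Or.inr ⟨s, by simp [hs], c, h, hne, hrem⟩)
        · rcases r with _ | ⟨q, r⟩
          · subst hcr
            refine Or.inl ?_
            simp only [Finset.mem_union, Finset.mem_image, Finset.mem_singleton]
            exact Or.inl (Or.inr ⟨s, hs, by simp [hrem, gveUnion]⟩)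
          · refine Or.inr (Or.inr ⟨s ∪ {p.1, p.2}, ?_, q :: r, hr, by simp, ?_⟩)
            · simp only [Finset.mem_union, Finset.mem_image, Finset.mem_singleton]
              exact Or.inl (Or.inr ⟨s, hs, rfl⟩)
            · rw [hrem, hcr, gveUnion_cons, Finset.union_assoc]

-- ===== VERDICT (by name: the statement is the Claim_ definition above) =====
theorem generate_valid_expressions_spec : Claim_equal_generate_valid_expressions := by
  intro expression pairs _
  unfold Spec_generate_valid_expressions generate_valid_expressions generate_valid_expressions_alt

  set n := pairs.length with hn
  set f : List (Int × Int) → String := fun combination =>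
    gveKeep expression
      (combination.foldl (fun s pair => PySem.Set.update s [pair.1, pair.2]) PySem.Set.empty)
    with hf
  set union_sets : Finset (Finset Int) := pairs.foldl
    (fun us p => us ∪ us.image (· ∪ {p.1, p.2}) ∪ {({p.1, p.2} : Finset Int)}) ∅ with hus
  set out : Finset String := union_sets.image (fun rem => gveKeepF expression rem) with hout
  set resultsA : PySem.Set String :=
    (PySem.List.pyRange 1 ((n : Int) + 1) 1).foldl (fun results r =>
      (PySem.List.combinations pairs r.toNat).foldl
        (fun results c => PySem.Set.add results (f c)) results) PySem.Set.empty with hres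
  -- characterise membership on both sides
  have hkeep : ∀ c : List (Int × Int), f c = gveKeepF expression (gveUnion c) := by
    intro c
    apply keep_eq
    intro i
    rw [mem_idxs, mem_gveUnion]
    simp [PySem.Set.empty]
  have hA : ∀ x, x ∈ resultsA ↔
      ∃ c, c.Sublist pairs ∧ c ≠ [] ∧ x = gveKeepF expression (gveUnion c) := by
    intro x
    rw [hres, mem_outer_fold]
    simp only [PySem.Set.empty, List.not_mem_nil, false_or]
    constructor
    · rintro ⟨r, hr, c, hc, hx⟩
      rw [PySem.List.mem_pyRange_one] at hr
      rw [PySem.List.mem_combinations_iff] at hc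
      refine ⟨c, hc.1, ?_, by rw [hx, hkeep]⟩
      intro hnil
      rw [hnil] at hc
      simp at hc
      omega
    · rintro ⟨c, hsub, hne, hx⟩
      refine ⟨(c.length : Int), ?_, c, ?_, by rw [hx, hkeep]⟩
      · rw [PySem.List.mem_pyRange_one]
        have h1 : 0 < c.length := List.length_pos_of_ne_nil hne
        have h2 : c.length ≤ n := hn ▸ hsub.length_le
        omega
      · rw [PySem.List.mem_combinations_iff]
        exact ⟨hsub, by simp⟩
  have hB : ∀ x, x ∈ out ↔
      ∃ c, c.Sublist pairs ∧ c ≠ [] ∧ x = gveKeepF expression (gveUnion c) := by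
    intro x
    rw [hout, Finset.mem_image]
    constructor
    · rintro ⟨rem, hrem, hx⟩
      rw [hus, mem_B_fold] at hrem
      rcases hrem with h | ⟨c, hsub, hne, hrem⟩ | ⟨s, hs, _⟩
      · exact absurd h (Finset.notMem_empty rem)
      · exact ⟨c, hsub, hne, by rw [← hx, hrem]⟩
      · exact absurd hs (Finset.notMem_empty s)
    · rintro ⟨c, hsub, hne, hx⟩
      refine ⟨gveUnion c, ?_, hx.symm⟩
      rw [hus, mem_B_fold]
      exact Or.inr (Or.inl ⟨c, hsub, hne, rfl⟩)
  -- both outputs are the sorted list of the same finite set of strings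
  have hndA : resultsA.Nodup := nodup_outer_fold _ _ _ _ (by simp [PySem.Set.empty])
  have hperm : (out.sort (· ≤ ·)).Perm resultsA := by
    rw [List.perm_ext_iff_of_nodup (Finset.sort_nodup _ _) hndA]
    intro x
    rw [Finset.mem_sort, hA, hB]
  exact PySem.List.sorted_eq_of_perm_of_pairwise_lt resultsA (out.sort (· ≤ ·)) (fun x => x)
    hperm ((Finset.sortedLT_sort out).pairwise)
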